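-- pv_equiv track=rewrite | github.com/song-hee-1/algorithm-practice | programmers/number_of_124_country.py | solution
-- ===== SOURCE A (Python) =====
-- def solution(n):
--     answer = ''
--     while n:
--         if n % 3 == 0:
--             answer = str(4) + answer
--             n = n//3 - 1
--         else:
--             answer = str(n % 3) + answer
--             n = n // 3
--     return answer
-- ===== SOURCE B (Python) =====
-- def solution(n):
--     if n == 0:
--         return ''
--     # first pass: digit count L = smallest L with n <= (3**(L+1) - 3) // 2
--     L = 1
--     while n > (3 ** (L + 1) - 3) // 2:
--         L += 1
--     # rank of n among the L-digit numbers, then emit digits most-significant-first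
--     m = n - 1 - (3 ** L - 3) // 2
--     answer = ''
--     p = 3 ** (L - 1)
--     for _ in range(L):
--         answer += "124"[m // p]
--         m %= p
--         p //= 3
--     return answer
-- ===== Notes on version B (the rewrite author's own statement) =====
-- stated objective: alternative
-- what changed: Two staged passes instead of A's single least-significant-first extraction loop: B first computes the digit count L from the geometric offsets (3^L-3)/2, then emits the digits most-significant-first by division by precomputed powers of 3, appending to the answer instead of prepending.
import Mathlib
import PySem

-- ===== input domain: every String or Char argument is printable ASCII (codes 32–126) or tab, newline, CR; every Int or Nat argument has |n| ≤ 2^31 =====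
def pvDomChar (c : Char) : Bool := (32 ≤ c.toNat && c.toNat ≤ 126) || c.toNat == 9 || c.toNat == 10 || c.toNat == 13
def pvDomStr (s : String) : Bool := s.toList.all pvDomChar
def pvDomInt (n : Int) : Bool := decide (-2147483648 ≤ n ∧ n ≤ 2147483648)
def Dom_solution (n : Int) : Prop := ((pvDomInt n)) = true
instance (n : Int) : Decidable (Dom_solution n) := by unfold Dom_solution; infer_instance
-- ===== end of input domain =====

-- B re-derives the representation in two staged passes (digit count from geometric
-- offsets, then most-significant-first emission by precomputed powers of 3) instead of
-- A's single least-significant-first loop; objective: alternative algorithm, same cost.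

-- ===== PORT A =====
-- A's while loop, recursing on the (nonnegative, strictly decreasing) loop variable.
def solutionLoop : Nat → String → String
  | 0, acc => acc
  | m + 1, acc =>
    if (m + 1) % 3 == 0 then
      solutionLoop ((m + 1) / 3 - 1) ("4" ++ acc)
    else
      solutionLoop ((m + 1) / 3) (toString ((m + 1) % 3) ++ acc)
decreasing_by all_goals omega

def solution (n : Int) : String := solutionLoop n.toNat ""

-- ===== PORT B =====
-- 3^(L+1) grows past 2L+3; used by the count loop's termination measure n - L.
theorem pvThreePow (L : Nat) : 2 * L + 3 ≤ 3 ^ (L + 1) := by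
  induction L with
  | zero => norm_num
  | succ k ih => rw [pow_succ]; nlinarith [ih]

-- B's first pass: while n > (3^(L+1) - 3)//2: L += 1
def solutionCount (n L : Nat) : Nat :=
  if (3 ^ (L + 1) - 3) / 2 < n then solutionCount n (L + 1) else L
termination_by n - L
decreasing_by have := pvThreePow L; omega

-- B's second pass: for _ in range(L): answer += "124"[m // p]; m %= p; p //= 3
def solutionEmit : Nat → Nat → Nat → String → String
  | 0, _, _, acc => acc
  | k + 1, m, p, acc =>
      solutionEmit k (m % p) (p / 3) (acc ++ ["1", "2", "4"].getD (m / p) "")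

def solution_alt (n : Int) : String :=
  if n.toNat = 0 then "" else
    let L := solutionCount n.toNat 1
    let m := n.toNat - 1 - (3 ^ L - 3) / 2
    solutionEmit L m (3 ^ (L - 1)) ""

-- ===== PRECONDITION & SPEC =====
-- Pre_ excludes n < 0, on which A's while loop never terminates (n//3 maps -1 to -1),
-- so A returns no value there.
def Pre_solution (n : Int) : Prop := 0 ≤ n
instance (n : Int) : Decidable (Pre_solution n) := by unfold Pre_solution; infer_instance
def pvWitness_solution : Int := (10)

def Spec_solution (n : Int) (out : String) : Prop := out = solution_alt n
instance (n : Int) (out : String) : Decidable (Spec_solution n out) := by unfold Spec_solution; infer_instance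

-- ===== CLAIM (what is proved, stated in full; the proofs are below) =====
def Claim_equal_solution : Prop := ∀ (n : Int), Dom_solution n → Pre_solution n → Spec_solution n (solution n)

-- ===== LEMMAS AND PROOFS =====

-- the digit table shared by both proofs' reference functions
def pvTab (d : Nat) : String := ["1", "2", "4"].getD d ""

-- reference: least-significant-first bijective base-3 expansion
def pvF : Nat → String
  | 0 => ""
  | k + 1 => pvF (k / 3) ++ pvTab (k % 3)
decreasing_by omega

-- standard base-3, fixed number of digits, low digit last
def pvG : Nat → Nat → String
  | 0, _ => ""
  | L + 1, m => pvG L (m / 3) ++ pvTab (m % 3)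

-- offset: count of numbers with fewer than L digits
def pvOff (L : Nat) : Nat := (3 ^ L - 3) / 2

theorem pvOff_char (L : Nat) (h : 1 ≤ L) : 2 * pvOff L + 3 = 3 ^ L := by
  induction L with
  | zero => omega
  | succ k ih =>
    rcases Nat.eq_or_lt_of_le h with h1 | h1
    · simp [pvOff, ← h1]
    · have hk := ih (by omega)
      have h3 : 3 ^ (k + 1) = 3 * 3 ^ k := by rw [pow_succ]; ring
      unfold pvOff at *
      omega

theorem pvA_eq (m : Nat) : ∀ acc, solutionLoop m acc = pvF m ++ acc := by
  induction m using Nat.strong_induction_on with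
  | _ m ih =>
    intro acc
    match m with
    | 0 => simp [solutionLoop, pvF]
    | k + 1 =>
      rw [solutionLoop, pvF]
      have h3 : (k + 1) % 3 = 0 ∨ (k + 1) % 3 = 1 ∨ (k + 1) % 3 = 2 := by omega
      rcases h3 with h | h | h
      · have hk : k % 3 = 2 := by omega
        have hd : (k + 1) / 3 - 1 = k / 3 := by omega
        simp only [h, hk, hd, pvTab]
        rw [ih (k / 3) (by omega)]
        simp [String.append_assoc]
      · have hk : k % 3 = 0 := by omega
        have hd : (k + 1) / 3 = k / 3 := by omega
        simp only [h, hk, hd, pvTab]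
        rw [ih (k / 3) (by omega)]
        simp [String.append_assoc]
        all_goals rfl
      · have hk : k % 3 = 1 := by omega
        have hd : (k + 1) / 3 = k / 3 := by omega
        simp only [h, hk, hd, pvTab]
        rw [ih (k / 3) (by omega)]
        simp [String.append_assoc]
        all_goals rfl

-- f on the L-digit range is standard base 3 of the rank
theorem pvF_eq_G (L : Nat) (h : 1 ≤ L) : ∀ m, m < 3 ^ L → pvF (m + pvOff L + 1) = pvG L m := by
  induction L with
  | zero => omega
  | succ k ih =>
    intro m hm
    rcases Nat.eq_or_lt_of_le h with h1 | h1
    · -- L = 1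
      have hk : k = 0 := by omega
      subst hk
      interval_cases m <;> simp [pvF, pvG, pvOff, pvTab]
    · -- L = k+1, k ≥ 1
      have hk1 : 1 ≤ k := by omega
      have hoff : pvOff (k + 1) = 3 * pvOff k + 3 := by
        have h1 := pvOff_char k hk1
        have h2 := pvOff_char (k + 1) (by omega)
        have h3 : 3 ^ (k + 1) = 3 * 3 ^ k := by rw [pow_succ]; ring
        omega
      have hn : m + pvOff (k + 1) + 1 = (m + 3 * pvOff k + 3) + 1 := by omega
      rw [hn, pvF]
      have hd : (m + 3 * pvOff k + 3) / 3 = m / 3 + pvOff k + 1 := by omega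
      have hr : (m + 3 * pvOff k + 3) % 3 = m % 3 := by omega
      rw [hd, hr, ih hk1 (m / 3) (by
        have h3 : 3 ^ (k + 1) = 3 * 3 ^ k := by rw [pow_succ]; ring
        omega)]
      rfl

-- peel the HIGH digit off pvG
theorem pvG_high (L : Nat) : ∀ m, m < 3 ^ (L + 1) →
    pvG (L + 1) m = pvTab (m / 3 ^ L) ++ pvG L (m % 3 ^ L) := by
  induction L with
  | zero =>
    intro m hm
    have : m % 3 = m := Nat.mod_eq_of_lt (by simpa using hm)
    simp [pvG, this]
  | succ k ih =>
    intro m hm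
    have hdd : m / 3 / 3 ^ k = m / 3 ^ (k + 1) := by
      rw [Nat.div_div_eq_div_mul, ← pow_succ']
    have hmlt : m / 3 < 3 ^ (k + 1) := by
      have h3 : 3 ^ (k + 2) = 3 ^ (k + 1) * 3 := by rw [pow_succ]
      omega
    have step : pvG (k + 2) m = pvG (k + 1) (m / 3) ++ pvTab (m % 3) := rfl
    rw [step, ih (m / 3) hmlt, hdd]
    have hmod3 : m % 3 ^ (k + 2) = m := Nat.mod_eq_of_lt hm
    have e1 : m / 3 % 3 ^ k = m % 3 ^ (k + 1) / 3 := by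
      rw [pow_succ']; exact (Nat.mod_mul_right_div_self m 3 (3 ^ k)).symm
    have e2 : m % 3 ^ (k + 1) % 3 = m % 3 := by
      exact Nat.mod_mod_of_dvd m (dvd_pow_self 3 (by omega))
    have step2 : pvG (k + 1) (m % 3 ^ (k + 1)) =
        pvG k (m % 3 ^ (k + 1) / 3) ++ pvTab (m % 3 ^ (k + 1) % 3) := rfl
    rw [step2, ← e1, e2, String.append_assoc]

-- the emit loop writes pvG after the accumulator (p only matters when L ≥ 1)
theorem pvEmit_eq (L : Nat) : ∀ m p acc, m < 3 ^ L → (1 ≤ L → p = 3 ^ (L - 1)) →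
    solutionEmit L m p acc = acc ++ pvG L m := by
  induction L with
  | zero => intro m p acc hm _; simp [solutionEmit, pvG]
  | succ k ih =>
    intro m p acc hm hp
    have hp' : p = 3 ^ k := by simpa using hp (by omega)
    subst hp'
    show solutionEmit k (m % 3 ^ k) (3 ^ k / 3) (acc ++ pvTab (m / 3 ^ k)) = acc ++ pvG (k + 1) m
    have hq : 1 ≤ k → 3 ^ k / 3 = 3 ^ (k - 1) := by
      intro hk
      match k, hk with
      | j + 1, _ => rw [pow_succ, Nat.mul_div_cancel _ (by omega)]; rfl
    rw [ih (m % 3 ^ k) _ _ (Nat.mod_lt _ (by positivity)) hq,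
        pvG_high k m hm, String.append_assoc]

-- correctness of the count loop
theorem pvCount_spec (n : Nat) : ∀ L, 1 ≤ L → pvOff L < n →
    1 ≤ solutionCount n L ∧ pvOff (solutionCount n L) < n ∧ n ≤ pvOff (solutionCount n L + 1) := by
  intro L
  induction L using solutionCount.induct n with
  | case1 L hlt ih =>
    intro h1 h2
    rw [solutionCount, if_pos hlt]
    exact ih (by omega) hlt
  | case2 L hge =>
    intro h1 h2
    rw [solutionCount, if_neg hge]
    exact ⟨h1, h2, by unfold pvOff; omega⟩

-- ===== VERDICT (by name: the statement is the Claim_ definition above) =====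
theorem solution_spec : Claim_equal_solution := by
  intro n _ hpre
  unfold Spec_solution solution solution_alt
  rcases Nat.eq_zero_or_pos n.toNat with h0 | hpos
  · simp [h0, solutionLoop]
  · rw [if_neg (by omega)]
    show solutionLoop n.toNat "" =
      solutionEmit (solutionCount n.toNat 1)
        (n.toNat - 1 - (3 ^ solutionCount n.toNat 1 - 3) / 2)
        (3 ^ (solutionCount n.toNat 1 - 1)) ""
    obtain ⟨hL1, hlo, hhi⟩ := pvCount_spec n.toNat 1 (le_refl 1) (by simp [pvOff]; omega)
    set L := solutionCount n.toNat 1 with hL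
    have hchar := pvOff_char L hL1
    have hchar1 := pvOff_char (L + 1) (by omega)
    have h3 : 3 ^ (L + 1) = 3 * 3 ^ L := by rw [pow_succ]; ring
    have hm : n.toNat - 1 - (3 ^ L - 3) / 2 = n.toNat - 1 - pvOff L := rfl
    have hmlt : n.toNat - 1 - pvOff L < 3 ^ L := by unfold pvOff at *; omega
    rw [hm, pvEmit_eq L _ _ "" hmlt (fun _ => rfl)]
    have hrank : (n.toNat - 1 - pvOff L) + pvOff L + 1 = n.toNat := by omega
    rw [pvA_eq n.toNat "", ← hrank, pvF_eq_G L hL1 _ hmlt]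
    simp
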